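-- pv_equiv track=rewrite | github.com/jakobtfaber/scirag | scirag/enhanced_processing/mathematical_processor.py | _generate_kgrams
-- ===== SOURCE A (Python) =====
-- from typing import Dict, List, Any, Optional
--
-- def _generate_kgrams(tokens: List[str], k: int = 3) -> List[str]:
--     """Generate k-grams from tokens."""
--     if not tokens or k <= 0:
--         return []
--
--     kgrams = []
--     for i in range(len(tokens) - k + 1):
--         kgram = ' '.join(tokens[i:i+k])
--         kgrams.append(kgram)
--
--     return kgrams
-- ===== SOURCE B (Python) =====
-- def _generate_kgrams(tokens, k=3):
--     """Generate k-grams from tokens."""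
--     if not tokens or k <= 0 or k > len(tokens):
--         return []
--     views = [tokens[i:] for i in range(k)]
--     return [' '.join(window) for window in zip(*views)]
-- ===== Notes on version B (the rewrite author's own statement) =====
-- stated objective: idiomatic
-- what changed: B builds k offset views of the token list and zips them element-wise (column-wise traversal), joining each tuple, instead of re-slicing a fresh window per start index in an explicit loop; an extra k > len(tokens) guard short-circuits the degenerate case without building the views.
import Mathlib
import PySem

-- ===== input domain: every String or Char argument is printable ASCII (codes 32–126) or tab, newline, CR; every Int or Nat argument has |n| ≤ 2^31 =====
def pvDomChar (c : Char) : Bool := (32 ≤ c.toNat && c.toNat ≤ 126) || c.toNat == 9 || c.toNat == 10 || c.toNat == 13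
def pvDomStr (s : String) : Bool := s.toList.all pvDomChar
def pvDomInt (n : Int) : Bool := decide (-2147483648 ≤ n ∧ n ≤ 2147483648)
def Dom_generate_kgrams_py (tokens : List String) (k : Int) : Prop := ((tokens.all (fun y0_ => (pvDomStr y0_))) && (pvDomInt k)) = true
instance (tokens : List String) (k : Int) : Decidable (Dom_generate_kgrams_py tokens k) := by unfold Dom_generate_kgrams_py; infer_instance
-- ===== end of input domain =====

-- B replaces A's index loop over fresh window slices by zipping k offset views of the token list (idiomatic decomposition, same cost).
-- ===== PORT A =====
def generate_kgrams_py (tokens : List String) (k : Int) : List String :=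
  if tokens = [] ∨ k ≤ 0 then []
  else
    (PySem.List.pyRange 0 ((tokens.length : Int) - k + 1) 1).foldl
      (fun kgrams i =>
        kgrams ++ [PySem.Str.join " " (PySem.List.slice tokens (some i) (some (i + k)))]) []

-- ===== PORT B =====
-- zip(*views): stop at the first exhausted view.
def pvAllHeads : List (List String) → Option (List String)
  | [] => some []
  | [] :: _ => none
  | (a :: _) :: ls => (pvAllHeads ls).map (a :: ·)

def pvZipStarAux : List String → List (List String) → List (List String)
  | [], _ => []
  | a :: as, ls =>
    match pvAllHeads ls with
    | some hs => (a :: hs) :: pvZipStarAux as (ls.map List.tail)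
    | none => []

def pvZipStar : List (List String) → List (List String)
  | [] => []
  | l :: ls => pvZipStarAux l ls

def generate_kgrams_py_alt (tokens : List String) (k : Int) : List String :=
  if tokens = [] ∨ k ≤ 0 ∨ (tokens.length : Int) < k then []
  else
    let views := (PySem.List.pyRange 0 k 1).map (fun i => PySem.List.slice tokens (some i) none)
    (pvZipStar views).map (fun window => PySem.Str.join " " window)

-- ===== PRECONDITION & SPEC =====
def Spec_generate_kgrams_py (tokens : List String) (k : Int) (out : List String) : Prop := out = generate_kgrams_py_alt tokens k
instance (tokens : List String) (k : Int) (out : List String) : Decidable (Spec_generate_kgrams_py tokens k out) := by unfold Spec_generate_kgrams_py; infer_instance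

-- ===== CLAIM (what is proved, stated in full; the proofs are below) =====
def Claim_equal_generate_kgrams_py : Prop := ∀ (tokens : List String) (k : Int), Dom_generate_kgrams_py tokens k → Spec_generate_kgrams_py tokens k (generate_kgrams_py tokens k)

-- ===== LEMMAS AND PROOFS =====
def pvViews (m : Nat) (ts : List String) : List (List String) :=
  (List.range m).map (fun i => ts.drop i)

lemma pvViews_succ_cons (m : Nat) (a : String) (tl : List String) :
    pvViews (m+1) (a :: tl) = (a :: tl) :: pvViews m tl := by
  simp [pvViews, List.range_succ_eq_map, List.map_map, Function.comp_def]

lemma pvViews_succ (m : Nat) (ts : List String) :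
    pvViews (m+1) ts = ts :: (pvViews m ts).map List.tail := by
  simp only [pvViews, List.range_succ_eq_map, List.map_cons, List.drop_zero, List.map_map]
  congr 1
  exact List.map_congr_left (fun i _ => by simp [List.tail_drop])

lemma pvAllHeads_views (m : Nat) (ts : List String) (h : m ≤ ts.length) :
    pvAllHeads (pvViews m ts) = some (ts.take m) := by
  induction m generalizing ts with
  | zero => simp [pvViews, pvAllHeads]
  | succ m ih =>
    cases ts with
    | nil => simp at h
    | cons a tl =>
      rw [pvViews_succ_cons, pvAllHeads, ih tl (by simpa using h)]
      simp

lemma pvAllHeads_views_none (m : Nat) (ts : List String) (h : ts.length < m) :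
    pvAllHeads (pvViews m ts) = none := by
  induction m generalizing ts with
  | zero => omega
  | succ m ih =>
    cases ts with
    | nil =>
      rw [pvViews_succ, pvAllHeads]
    | cons a tl =>
      rw [pvViews_succ_cons, pvAllHeads, ih tl (by simpa using h)]
      rfl

lemma pvZipStarAux_cons_some (a : String) (as : List String) (ls : List (List String))
    (hs : List String) (h : pvAllHeads ls = some hs) :
    pvZipStarAux (a :: as) ls = (a :: hs) :: pvZipStarAux as (ls.map List.tail) := by
  rw [pvZipStarAux, h]

lemma pvZipStarAux_cons_none (a : String) (as : List String) (ls : List (List String))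
    (h : pvAllHeads ls = none) : pvZipStarAux (a :: as) ls = [] := by
  rw [pvZipStarAux, h]

lemma pvZipStar_views_succ (m : Nat) (ts : List String) :
    pvZipStar (pvViews (m+1) ts) =
      (List.range (ts.length + 1 - (m+1))).map (fun j => (ts.drop j).take (m+1)) := by
  induction ts with
  | nil =>
    rw [pvViews_succ, pvZipStar]
    have : ([] : List String).length + 1 - (m+1) = 0 := by simp
    rw [this]
    simp [pvZipStarAux]
  | cons a tl ih =>
    rw [pvViews_succ_cons, pvZipStar]
    by_cases hm : m ≤ tl.length
    · rw [pvZipStarAux_cons_some a tl _ _ (pvAllHeads_views m tl hm)]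
      have hz : pvZipStarAux tl ((pvViews m tl).map List.tail) =
          pvZipStar (pvViews (m+1) tl) := by
        rw [pvViews_succ, pvZipStar]
      rw [hz, ih]
      rcases Nat.lt_or_ge tl.length (m + 1) with h1 | h1
      · -- the recursive zip is empty: exactly one window remains
        have hm' : tl.length = m := by omega
        rw [show tl.length + 1 - (m+1) = 0 by omega,
          show (a :: tl).length + 1 - (m+1) = 1 by simp; omega]
        simp [hm', List.take_of_length_le]
      · rw [show (a :: tl).length + 1 - (m+1) = (tl.length + 1 - (m+1)) + 1 by simp; omega,
          List.range_succ_eq_map, List.map_cons, List.map_map]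
        congr 1
    · rw [pvZipStarAux_cons_none a tl _ (pvAllHeads_views_none m tl (by omega))]
      rw [show (a :: tl).length + 1 - (m+1) = 0 by simp; omega]
      rfl

lemma pvZipStar_views_succ_app (kk : Nat) (ts : List String) (hk : 1 ≤ kk) :
    pvZipStar (pvViews kk ts) =
      (List.range (ts.length + 1 - kk)).map (fun j => (ts.drop j).take kk) := by
  obtain ⟨m, rfl⟩ : ∃ m, kk = m + 1 := ⟨kk - 1, by omega⟩
  exact pvZipStar_views_succ m ts

-- ===== VERDICT (by name: the statement is the Claim_ definition above) =====
theorem generate_kgrams_py_spec : Claim_equal_generate_kgrams_py := by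
  intro tokens k _
  unfold Spec_generate_kgrams_py generate_kgrams_py generate_kgrams_py_alt
  by_cases hg : tokens = [] ∨ k ≤ 0
  · rcases hg with h | h <;> simp [h]
  · simp only [if_neg hg]
    rw [not_or] at hg
    obtain ⟨hne, hkpos⟩ := hg
    by_cases hbig : (tokens.length : Int) < k
    · -- k exceeds the token count: A's range is empty, B's guard fires
      rw [if_pos (Or.inr (Or.inr hbig)), PySem.List.pyRange_one_eq_nil (by omega)]
      rfl
    · rw [if_neg (by push Not; exact ⟨hne, by omega, by omega⟩)]
      obtain ⟨kk, rfl⟩ : ∃ kk : Nat, k = (kk : Int) := ⟨k.toNat, by omega⟩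
      have hk1 : 1 ≤ kk := by omega
      -- B side: the offset views are pvViews kk tokens
      have hviews : (PySem.List.pyRange 0 (kk : Int) 1).map
          (fun i => PySem.List.slice tokens (some i) none) =
          pvViews kk tokens := by
        rw [PySem.List.pyRange_one]
        simp only [List.map_map]
        rw [show ((kk : Int) - 0).toNat = kk by omega, pvViews]
        exact List.map_congr_left (fun i _ => by
          simp [Function.comp, PySem.List.slice_from_natCast])
      simp only [hviews]
      rw [pvZipStar_views_succ_app kk tokens hk1]
      -- A side: the foldl-append loop is a map over the range of window starts
      rw [PySem.List.pyRange_one, PySem.List.foldl_append_singleton_eq_map]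
      rw [show ((tokens.length : Int) - (kk : Int) + 1 - 0).toNat = tokens.length + 1 - kk by omega]
      simp only [List.map_map, List.nil_append]
      exact List.map_congr_left (fun j _ => by
        simp only [Function.comp, zero_add]
        rw [show (j : Int) + (kk : Int) = ((j : Int) + ((kk : Nat) : Int)) from rfl,
          PySem.List.slice_natCast_add])
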